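-- pv_equiv track=rewrite | github.com/jackinf/aoc | day15/main.py | count_occupied_cells
-- ===== SOURCE A (Python) =====
-- from typing import List, Tuple, Set
--
-- Coord = Tuple[int, int]
--
-- def count_occupied_cells(x_intervals: list[Coord], sensors_xs: List[int], beacon_xs: List[int]) -> int:
--     total = sum(end - start + 1 for start, end in x_intervals)
--     for start, end in x_intervals:
--         for beacon_x in beacon_xs:
--             if start <= beacon_x <= end:
--                 total -= 1
--         for sensors_x in sensors_xs:
--             if start <= sensors_x <= end:
--                 total -= 1
--     return total
-- ===== SOURCE B (Python) =====
-- def _bisect_left(pts, x):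
--     lo, hi = 0, len(pts)
--     while lo < hi:
--         mid = (lo + hi) // 2
--         if pts[mid] < x:
--             lo = mid + 1
--         else:
--             hi = mid
--     return lo
--
--
-- def _bisect_right(pts, x):
--     lo, hi = 0, len(pts)
--     while lo < hi:
--         mid = (lo + hi) // 2
--         if pts[mid] <= x:
--             lo = mid + 1
--         else:
--             hi = mid
--     return lo
--
--
-- def count_occupied_cells(x_intervals, sensors_xs, beacon_xs):
--     pts = sorted(beacon_xs + sensors_xs)
--     total = 0
--     for start, end in x_intervals:
--         total += end - start + 1
--         lo = _bisect_left(pts, start)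
--         hi = _bisect_right(pts, end)
--         if hi > lo:
--             total -= hi - lo
--     return total
-- ===== Notes on version B (the rewrite author's own statement) =====
-- stated objective: faster
-- what changed: Instead of scanning every beacon and sensor for each interval, B sorts the combined beacon+sensor point list once and counts the points inside each interval with two binary searches.
import Mathlib
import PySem

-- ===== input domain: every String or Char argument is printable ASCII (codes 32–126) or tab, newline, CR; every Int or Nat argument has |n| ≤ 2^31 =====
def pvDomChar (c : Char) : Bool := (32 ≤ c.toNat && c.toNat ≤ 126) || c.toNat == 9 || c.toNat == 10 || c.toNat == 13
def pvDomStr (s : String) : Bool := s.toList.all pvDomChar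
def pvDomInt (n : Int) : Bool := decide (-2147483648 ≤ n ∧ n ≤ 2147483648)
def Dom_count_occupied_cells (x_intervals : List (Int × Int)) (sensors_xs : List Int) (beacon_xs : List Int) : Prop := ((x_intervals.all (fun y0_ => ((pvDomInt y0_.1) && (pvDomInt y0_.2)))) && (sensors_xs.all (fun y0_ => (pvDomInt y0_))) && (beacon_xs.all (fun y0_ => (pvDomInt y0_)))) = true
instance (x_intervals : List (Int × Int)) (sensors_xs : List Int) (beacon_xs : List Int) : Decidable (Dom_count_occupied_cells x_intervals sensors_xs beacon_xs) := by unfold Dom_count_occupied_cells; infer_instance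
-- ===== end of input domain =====

-- B replaces A's per-interval scan over all beacons and sensors by one sort of the
-- combined point list plus two binary searches per interval (faster; return value only,
-- neither program mutates its arguments).

-- ===== PORT A =====
def count_occupied_cells (x_intervals : List (Int × Int)) (sensors_xs : List Int) (beacon_xs : List Int) : Int :=
  let total := x_intervals.foldl (fun acc p => acc + (p.2 - p.1 + 1)) 0
  x_intervals.foldl (fun total p =>
    let total := beacon_xs.foldl
      (fun t beacon_x => if p.1 ≤ beacon_x ∧ beacon_x ≤ p.2 then t - 1 else t) total
    sensors_xs.foldl
      (fun t sensors_x => if p.1 ≤ sensors_x ∧ sensors_x ≤ p.2 then t - 1 else t) total) total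

-- ===== PORT B =====
-- Source B's hand-written _bisect_left/_bisect_right are exactly Python's bisect_left/bisect_right;
-- ported as the PySem primitives of the same meaning (PySem.List.bisectLeft / bisectRight).
def count_occupied_cells_alt (x_intervals : List (Int × Int)) (sensors_xs : List Int) (beacon_xs : List Int) : Int :=
  let pts := PySem.List.sorted (beacon_xs ++ sensors_xs) (fun x => x) false
  x_intervals.foldl (fun total p =>
    let total := total + (p.2 - p.1 + 1)
    let lo := PySem.List.bisectLeft pts p.1
    let hi := PySem.List.bisectRight pts p.2
    if hi > lo then total - ((hi : Int) - (lo : Int)) else total) 0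

-- ===== PRECONDITION & SPEC =====
def Spec_count_occupied_cells (x_intervals : List (Int × Int)) (sensors_xs : List Int) (beacon_xs : List Int) (out : Int) : Prop := out = count_occupied_cells_alt x_intervals sensors_xs beacon_xs
instance (x_intervals : List (Int × Int)) (sensors_xs : List Int) (beacon_xs : List Int) (out : Int) : Decidable (Spec_count_occupied_cells x_intervals sensors_xs beacon_xs out) := by unfold Spec_count_occupied_cells; infer_instance

-- ===== CLAIM (what is proved, stated in full; the proofs are below) =====
def Claim_equal_count_occupied_cells : Prop := ∀ (x_intervals : List (Int × Int)) (sensors_xs : List Int) (beacon_xs : List Int), Dom_count_occupied_cells x_intervals sensors_xs beacon_xs → Spec_count_occupied_cells x_intervals sensors_xs beacon_xs (count_occupied_cells x_intervals sensors_xs beacon_xs)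

-- ===== LEMMAS AND PROOFS =====

-- A's inner loop subtracts 1 per matching element: it is acc minus a countP.
theorem pv_foldl_sub_count (p : Int → Prop) [DecidablePred p] (l : List Int) (a : Int) :
    l.foldl (fun t x => if p x then t - 1 else t) a
      = a - (l.countP (fun x => decide (p x)) : Int) := by
  induction l generalizing a with
  | nil => simp
  | cons x xs ih =>
    simp only [List.foldl_cons, List.countP_cons, ih]
    by_cases h : p x
    · simp [h]; omega
    · simp [h]

-- On a sorted list, bisectLeft counts the elements < x.
theorem pv_bisectLeft_eq_countP (pts : List Int) (x : Int)
    (hs : pts.Pairwise (· ≤ ·)) :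
    PySem.List.bisectLeft pts x = pts.countP (fun y => decide (y < x)) := by
  obtain ⟨hle, hlt, hge⟩ := PySem.List.bisectLeft_spec pts x hs
  set n := PySem.List.bisectLeft pts x with hn
  rw [← List.take_append_drop n pts, List.countP_append]
  have h1 : (pts.take n).countP (fun y => decide (y < x)) = n := by
    rw [List.countP_eq_length.mpr, List.length_take, Nat.min_eq_left hle]
    intro y hy
    obtain ⟨i, hi, rfl⟩ := List.mem_iff_getElem.mp hy
    have hlen : (pts.take n).length = n := by simp [hle]
    have hi' : i < n := by omega
    have : (pts.take n)[i] = pts[i]'(by omega) := List.getElem_take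
    rw [this]
    exact decide_eq_true (hlt i (by omega) hi')
  have h2 : (pts.drop n).countP (fun y => decide (y < x)) = 0 := by
    rw [List.countP_eq_zero]
    intro y hy
    obtain ⟨i, hi, rfl⟩ := List.mem_iff_getElem.mp hy
    have hlen : (pts.drop n).length = pts.length - n := by simp
    have : (pts.drop n)[i] = pts[n + i]'(by omega) := List.getElem_drop
    rw [this]
    simp only [decide_eq_true_eq]
    have := hge (n + i) (by omega) (by omega)
    omega
  omega

-- On a sorted list, bisectRight counts the elements ≤ x.
theorem pv_bisectRight_eq_countP (pts : List Int) (x : Int)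
    (hs : pts.Pairwise (· ≤ ·)) :
    PySem.List.bisectRight pts x = pts.countP (fun y => decide (y ≤ x)) := by
  obtain ⟨hle, hlt, hge⟩ := PySem.List.bisectRight_spec pts x hs
  set n := PySem.List.bisectRight pts x with hn
  rw [← List.take_append_drop n pts, List.countP_append]
  have h1 : (pts.take n).countP (fun y => decide (y ≤ x)) = n := by
    rw [List.countP_eq_length.mpr, List.length_take, Nat.min_eq_left hle]
    intro y hy
    obtain ⟨i, hi, rfl⟩ := List.mem_iff_getElem.mp hy
    have hlen : (pts.take n).length = n := by simp [hle]
    have hi' : i < n := by omega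
    have : (pts.take n)[i] = pts[i]'(by omega) := List.getElem_take
    rw [this]
    exact decide_eq_true (hlt i (by omega) hi')
  have h2 : (pts.drop n).countP (fun y => decide (y ≤ x)) = 0 := by
    rw [List.countP_eq_zero]
    intro y hy
    obtain ⟨i, hi, rfl⟩ := List.mem_iff_getElem.mp hy
    have hlen : (pts.drop n).length = pts.length - n := by simp
    have : (pts.drop n)[i] = pts[n + i]'(by omega) := List.getElem_drop
    rw [this]
    simp only [decide_eq_true_eq]
    have := hge (n + i) (by omega) (by omega)
    omega
  omega

-- Splitting the count of elements ≤ e at s, when s ≤ e.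
theorem pv_count_split (l : List Int) (s e : Int) (hse : s ≤ e) :
    l.countP (fun y => decide (y ≤ e))
      = l.countP (fun y => decide (y < s))
        + l.countP (fun y => decide (s ≤ y ∧ y ≤ e)) := by
  induction l with
  | nil => simp
  | cons x xs ih =>
    simp only [List.countP_cons, ih, decide_eq_true_eq]
    split_ifs with h1 h2 h2 <;> simp_all <;> omega

-- B's branch subtracts exactly the number of points inside [s, e].
theorem pv_branch_eq (pts : List Int) (s e t : Int)
    (hs : pts.Pairwise (· ≤ ·)) :
    (if PySem.List.bisectLeft pts s < PySem.List.bisectRight pts e then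
        t - ((PySem.List.bisectRight pts e : Int) - (PySem.List.bisectLeft pts s : Int))
      else t)
      = t - (pts.countP (fun y => decide (s ≤ y ∧ y ≤ e)) : Int) := by
  rw [pv_bisectLeft_eq_countP pts s hs, pv_bisectRight_eq_countP pts e hs]
  by_cases hse : s ≤ e
  · have hsplit := pv_count_split pts s e hse
    have hge : pts.countP (fun y => decide (y < s)) ≤ pts.countP (fun y => decide (y ≤ e)) := by
      omega
    by_cases hc : pts.countP (fun y => decide (y < s)) < pts.countP (fun y => decide (y ≤ e))
    · simp only [if_pos hc]; omega
    · simp only [if_neg hc]; omega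
  · have h0 : pts.countP (fun y => decide (s ≤ y ∧ y ≤ e)) = 0 := by
      rw [List.countP_eq_zero]
      intro y _
      simp only [decide_eq_true_eq]
      omega
    have hmono : pts.countP (fun y => decide (y ≤ e)) ≤ pts.countP (fun y => decide (y < s)) := by
      apply List.countP_mono_left
      intro y _ hy
      simp only [decide_eq_true_eq] at *
      omega
    rw [if_neg (by omega), h0]
    simp

-- Number of combined points inside an interval, used as the common form.
theorem pv_count_pts (sensors_xs beacon_xs : List Int) (s e : Int) :
    ((PySem.List.sorted (beacon_xs ++ sensors_xs) (fun x => x) false).countP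
        (fun y => decide (s ≤ y ∧ y ≤ e)) : Int)
      = (beacon_xs.countP (fun y => decide (s ≤ y ∧ y ≤ e)) : Int)
        + (sensors_xs.countP (fun y => decide (s ≤ y ∧ y ≤ e)) : Int) := by
  have hperm := PySem.List.sorted_perm (beacon_xs ++ sensors_xs) (fun x => x) false
  rw [hperm.countP_eq, List.countP_append]
  push_cast; ring

-- A's outer loop, as initial total minus the summed per-interval counts.
theorem pv_A_fold (x_intervals : List (Int × Int)) (sensors_xs beacon_xs : List Int) (t : Int) :
    x_intervals.foldl (fun total p =>
        let total := beacon_xs.foldl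
          (fun t beacon_x => if p.1 ≤ beacon_x ∧ beacon_x ≤ p.2 then t - 1 else t) total
        sensors_xs.foldl
          (fun t sensors_x => if p.1 ≤ sensors_x ∧ sensors_x ≤ p.2 then t - 1 else t) total) t
      = t - (x_intervals.map (fun p =>
          (beacon_xs.countP (fun y => decide (p.1 ≤ y ∧ y ≤ p.2)) : Int)
            + (sensors_xs.countP (fun y => decide (p.1 ≤ y ∧ y ≤ p.2)) : Int))).sum := by
  induction x_intervals generalizing t with
  | nil => simp
  | cons p ps ih =>
    simp only [List.foldl_cons, List.map_cons, List.sum_cons, ih,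
      pv_foldl_sub_count (fun y => p.1 ≤ y ∧ y ≤ p.2)]
    ring

-- B's loop, as initial total plus the summed per-interval contributions.
theorem pv_B_fold (x_intervals : List (Int × Int)) (pts : List Int)
    (hs : pts.Pairwise (· ≤ ·)) (t : Int) :
    x_intervals.foldl (fun total p =>
        let total := total + (p.2 - p.1 + 1)
        let lo := PySem.List.bisectLeft pts p.1
        let hi := PySem.List.bisectRight pts p.2
        if hi > lo then total - ((hi : Int) - (lo : Int)) else total) t
      = t + (x_intervals.map (fun p =>
          (p.2 - p.1 + 1) - (pts.countP (fun y => decide (p.1 ≤ y ∧ y ≤ p.2)) : Int))).sum := by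
  induction x_intervals generalizing t with
  | nil => simp
  | cons p ps ih =>
    simp only [List.foldl_cons, List.map_cons, List.sum_cons, ih]
    rw [pv_branch_eq pts p.1 p.2 _ hs]
    ring

-- Distributing a sum over a pointwise difference (used once at the end).
theorem pv_sum_map_sub {α : Type} (l : List α) (f g : α → Int) :
    (l.map (fun x => f x - g x)).sum = (l.map f).sum - (l.map g).sum := by
  induction l with
  | nil => simp
  | cons x xs ih => simp [ih]; ring

-- A's initial sum of interval lengths.
theorem pv_len_sum (x_intervals : List (Int × Int)) :
    x_intervals.foldl (fun acc p => acc + (p.2 - p.1 + 1)) 0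
      = (x_intervals.map (fun p => p.2 - p.1 + 1)).sum := by
  induction x_intervals using List.reverseRecOn with
  | nil => simp
  | append_singleton ps p ih => simp [ih]

-- ===== VERDICT (by name: the statement is the Claim_ definition above) =====
theorem count_occupied_cells_spec : Claim_equal_count_occupied_cells := by
  intro x_intervals sensors_xs beacon_xs _
  unfold Spec_count_occupied_cells count_occupied_cells count_occupied_cells_alt
  have hs : (PySem.List.sorted (beacon_xs ++ sensors_xs) (fun x => x) false).Pairwise (· ≤ ·) :=
    PySem.List.sorted_pairwise (beacon_xs ++ sensors_xs) (fun x => x)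
  simp only [pv_A_fold, pv_B_fold _ _ hs, pv_len_sum]
  rw [zero_add]
  simp only [pv_count_pts]
  rw [pv_sum_map_sub x_intervals (fun p => p.2 - p.1 + 1)
    (fun p => (beacon_xs.countP (fun y => decide (p.1 ≤ y ∧ y ≤ p.2)) : Int)
      + (sensors_xs.countP (fun y => decide (p.1 ≤ y ∧ y ≤ p.2)) : Int))]
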